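-- pv_equiv track=rewrite | github.com/haseatsu114514-dot/shisha-game | tools/sprite_face_swap.py | group_expressions_by_pose
-- ===== SOURCE A (Python) =====
-- def group_expressions_by_pose(expressions: list[str]) -> list[tuple[str, list[str]]]:
--     """
--     表情をポーズグループに分ける。
--     プレフィックスが共通のものをグループ化する。
--     例: [normal, sad, smile, ura_normal, ura_sad] →
--         [("normal", [normal, sad, smile]), ("ura_normal", [ura_normal, ura_sad])]
--     """
--     # まず「ベース表情」の候補を見つける（normal を含むもの）
--     groups: dict[str, list[str]] = {}
--     for expr in expressions:
--         if expr == "normal":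
--             groups.setdefault("normal", [])
--         elif expr.endswith("_normal"):
--             groups.setdefault(expr, [])
--
--     # 各表情をグループに振り分け
--     for expr in expressions:
--         if expr in groups:
--             # ベース表情自身は既に登録済み
--             continue
--         # どのグループに属するか判定（プレフィックスが最も長く一致するもの）
--         best_base = "normal"
--         best_len = 0
--         for base_name in groups:
--             if base_name == "normal":
--                 # プレフィックスなし表情は normal グループ
--                 # ura_xxx は "normal" にはマッチさせない
--                 if "_" not in expr:
--                     best_base = "normal"
--                 continue
--             prefix = base_name.replace("_normal", "_")
--             if expr.startswith(prefix) and len(prefix) > best_len: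
--                 best_base = base_name
--                 best_len = len(prefix)
--
--         groups.setdefault(best_base, []).append(expr)
--
--     return [(base, members) for base, members in groups.items()]
-- ===== SOURCE B (Python) =====
-- def group_expressions_by_pose(expressions: list[str]) -> list[tuple[str, list[str]]]:
--     """Group expressions by longest matching base-name prefix, via a precomputed
--     prefix dictionary and a longest-prefix scan per expression."""
--
--     def is_base(e: str) -> bool:
--         return e == "normal" or e.endswith("_normal")
--
--     # base expressions, first-occurrence order, deduplicated
--     bases: list[str] = []
--     seen: set[str] = set()
--     for e in expressions:
--         if is_base(e) and e not in seen:
--             seen.add(e)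
--             bases.append(e)
--
--     # prefix -> owning base (first base wins for a shared prefix)
--     prefix_to_base: dict[str, str] = {}
--     for b in bases:
--         if b != "normal":
--             prefix_to_base.setdefault(b.replace("_normal", "_"), b)
--
--     members: dict[str, list[str]] = {b: [] for b in bases}
--     for e in expressions:
--         if is_base(e):
--             continue
--         base = "normal"
--         for k in range(len(e), 0, -1):
--             hit = prefix_to_base.get(e[:k])
--             if hit is not None:
--                 base = hit
--                 break
--         members.setdefault(base, []).append(e)
--
--     return list(members.items())
-- ===== Notes on version B (the rewrite author's own statement) =====
-- stated objective: alternative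
-- what changed: B precomputes one prefix-to-base dictionary from the base expressions and assigns each expression by testing its own prefixes longest-first against that dictionary, instead of A's inner scan over all groups (recomputing each group's prefix) for every expression.
import Mathlib
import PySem

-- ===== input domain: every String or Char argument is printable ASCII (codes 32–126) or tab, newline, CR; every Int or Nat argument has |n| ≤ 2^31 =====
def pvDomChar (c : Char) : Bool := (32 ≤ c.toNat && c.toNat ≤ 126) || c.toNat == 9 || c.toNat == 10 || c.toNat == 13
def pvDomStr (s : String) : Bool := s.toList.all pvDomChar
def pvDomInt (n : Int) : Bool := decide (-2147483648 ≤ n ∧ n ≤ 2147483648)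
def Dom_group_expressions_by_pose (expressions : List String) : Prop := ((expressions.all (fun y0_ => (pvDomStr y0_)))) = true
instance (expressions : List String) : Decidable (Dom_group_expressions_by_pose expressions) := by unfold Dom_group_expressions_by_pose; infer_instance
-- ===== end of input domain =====

-- B groups each expression by a longest-prefix scan against a precomputed prefix→base dictionary
-- instead of A's inner scan over all groups per expression (objective: alternative).

-- ===== PORT A =====
def group_expressions_by_pose (expressions : List String) : List (String × List String) :=
  let groups : PySem.Dict String (List String) :=
    expressions.foldl (fun groups expr =>
      if expr == "normal" then groups.setdefault "normal" []
      else if PySem.Str.endswith expr "_normal" then groups.setdefault expr []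
      else groups) PySem.Dict.empty
  let groups :=
    expressions.foldl (fun groups expr =>
      if groups.contains expr then groups
      else
        let best := groups.keys.foldl (fun (best : String × Int) base_name =>
          if base_name == "normal" then
            (if PySem.Str.isIn "_" expr then best else ("normal", best.2))
          else
            let prefix_ := PySem.Str.replace base_name "_normal" "_"
            if PySem.Str.startswith expr prefix_ && decide (best.2 < PySem.Str.len prefix_) then
              (base_name, PySem.Str.len prefix_)
            else best) ("normal", 0)
        (groups.setdefault best.1 []).modify best.1 [] (fun ms => ms ++ [expr])) groups
  groups.items.map (fun p => (p.1, p.2))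

-- ===== PORT B =====
def pvIsBase (e : String) : Bool := e == "normal" || PySem.Str.endswith e "_normal"

-- the 'for k in range(len(e), 0, -1)' loop: longest candidate prefix first
def pvScan (pd : PySem.Dict String String) (e : String) : Nat → String
  | 0 => "normal"
  | k + 1 =>
    match pd.get? (PySem.Str.slice e none (some ((k : Int) + 1))) with
    | some b => b
    | none => pvScan pd e k

def group_expressions_by_pose_alt (expressions : List String) : List (String × List String) :=
  let st := expressions.foldl (fun (st : List String × PySem.Set String) e =>
      if pvIsBase e && !(PySem.Set.contains st.2 e) then (st.1 ++ [e], PySem.Set.add st.2 e)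
      else st) ([], PySem.Set.empty)
  let bases := st.1
  let pd := bases.foldl (fun d b =>
      if b == "normal" then d
      else d.setdefault (PySem.Str.replace b "_normal" "_") b) PySem.Dict.empty
  let members := bases.foldl (fun d b => d.insert b ([] : List String)) PySem.Dict.empty
  let members := expressions.foldl (fun d e =>
      if pvIsBase e then d
      else
        let base := pvScan pd e (PySem.Str.len e).toNat
        (d.setdefault base []).modify base [] (fun ms => ms ++ [e])) members
  members.items.map (fun p => (p.1, p.2))

-- ===== PRECONDITION & SPEC =====
def Spec_group_expressions_by_pose (expressions : List String) (out : List (String × List String)) : Prop := out = group_expressions_by_pose_alt expressions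
instance (expressions : List String) (out : List (String × List String)) : Decidable (Spec_group_expressions_by_pose expressions out) := by unfold Spec_group_expressions_by_pose; infer_instance

-- ===== CLAIM (what is proved, stated in full; the proofs are below) =====
def Claim_equal_group_expressions_by_pose : Prop := ∀ (expressions : List String), Dom_group_expressions_by_pose expressions → Spec_group_expressions_by_pose expressions (group_expressions_by_pose expressions)

-- ===== LEMMAS AND PROOFS =====

-- ---------- proof-side abbreviations ----------

def pvPfx (b : String) : String := PySem.Str.replace b "_normal" "_"

def pvStepP (e : String) (st : String × Int) (q : String × String) : String × Int :=
  if PySem.Str.startswith e q.1 && decide (st.2 < PySem.Str.len q.1) then (q.2, PySem.Str.len q.1) else st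

def pvM (e : String) (pairs : List (String × String)) (t : Int) : Int :=
  pairs.foldl (fun a q => if PySem.Str.startswith e q.1 && decide (a < PySem.Str.len q.1) then PySem.Str.len q.1 else a) t

-- the scan's hit predicate: position j ≥ 1 whose prefix of e is a key of pd
abbrev pvPhit (pd : PySem.Dict String String) (e : String) (j : Nat) : Prop :=
  0 < j ∧ (pd.get? (String.ofList (e.toList.take j))).isSome = true

-- ---------- the replaced prefix of a base name contains an underscore ----------

theorem pv_mem_go (old new : List Char) (c : Char) :
    ∀ (fuel : Nat) (l acc : List Char), c ∈ acc → c ∈ PySem.Chars.replace.go old new fuel l acc := by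
  intro fuel
  induction fuel with
  | zero => intro l acc h; rw [PySem.Chars.replace.go]; simp [h]
  | succ f ih =>
    intro l acc h
    cases l with
    | nil =>
      rw [PySem.Chars.replace.go]
      simp [h]
      exact fun hh => absurd hh (Nat.succ_ne_zero f)
    | cons x t =>
      rw [PySem.Chars.replace.go]
      split
      · exact ih _ _ (by simp [h])
      · exact ih _ _ (by simp [h])

theorem pv_go_of_suffix (old new : List Char) (c : Char) (hold : old ≠ []) (hc : c ∈ new) :
    ∀ (fuel : Nat) (l acc : List Char), l.length ≤ fuel → old <:+ l →
      c ∈ PySem.Chars.replace.go old new fuel l acc := by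
  intro fuel
  induction fuel with
  | zero =>
    intro l acc hl hs
    interval_cases hlen : l.length
    · have : l = [] := List.length_eq_zero_iff.mp hlen
      subst this
      exact absurd (List.suffix_nil.mp hs) hold
  | succ f ih =>
    intro l acc hl hs
    cases l with
    | nil => exact absurd (List.suffix_nil.mp hs) hold
    | cons x t =>
      rw [PySem.Chars.replace.go]
      split
      · exact pv_mem_go _ _ _ _ _ _ (by simp [hc])
      · rename_i hnp
        have hst : old <:+ t := by
          rcases List.suffix_cons_iff.mp hs with h | h
          · exact absurd (by rw [h]; exact List.isPrefixOf_iff_prefix.mpr List.prefix_rfl) hnp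
          · exact h
        exact ih t (x :: acc) (by simpa using Nat.lt_succ_iff.mp (by simpa using hl)) hst

theorem pv_underscore_pfx (b : String) (h : PySem.Str.endswith b "_normal" = true) :
    '_' ∈ (pvPfx b).toList := by
  have hsuf : "_normal".toList <:+ b.toList := by
    rw [PySem.Str.endswith_eq, PySem.Chars.endswith_iff] at h
    exact h
  show '_' ∈ (PySem.Str.replace b "_normal" "_").toList
  rw [PySem.Str.toList_replace]
  unfold PySem.Chars.replace
  have hne : ("_normal".toList).isEmpty = false := by decide
  rw [hne]
  simp only [Bool.false_eq_true, if_false]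
  exact pv_go_of_suffix _ _ '_' (by decide) (by decide) _ _ _ le_rfl hsuf

theorem pv_isIn_underscore (e : String) : PySem.Str.isIn "_" e = true ↔ '_' ∈ e.toList := by
  rw [PySem.Str.isIn_eq, PySem.Chars.isIn_iff_infix]
  show ['_'] <:+: e.toList ↔ _
  constructor
  · intro h; exact h.sublist.subset (by simp)
  · intro h
    obtain ⟨s, t, he⟩ := List.append_of_mem h
    exact ⟨s, t, by rw [he]; simp⟩

-- ---------- prefixes of e of a given length ----------

theorem pv_take_iff (p : String) (e : String) (j : Nat) (hj : j ≤ e.toList.length) :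
    (p = String.ofList (e.toList.take j)) ↔ (PySem.Str.startswith e p = true ∧ p.toList.length = j) := by
  rw [PySem.Str.startswith_eq, PySem.Chars.startswith_iff]
  constructor
  · intro h
    subst h
    rw [String.toList_ofList]
    exact ⟨List.take_prefix _ _, by simp only [List.length_take]; exact Nat.min_eq_left hj⟩
  · rintro ⟨hpre, hlen⟩
    have h1 := List.prefix_iff_eq_take.mp hpre
    rw [hlen] at h1
    have := congrArg String.ofList h1
    simpa using this

-- ---------- the best-length fold ----------

theorem pvM_cons (e : String) (q : String × String) (rest : List (String × String)) (t : Int) :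
    pvM e (q :: rest) t =
      pvM e rest (if PySem.Str.startswith e q.1 && decide (t < PySem.Str.len q.1) then PySem.Str.len q.1 else t) := rfl

theorem pvM_ge (e : String) : ∀ (pairs : List (String × String)) (t : Int), t ≤ pvM e pairs t := by
  intro pairs
  induction pairs with
  | nil => intro t; exact le_rfl
  | cons q rest ih =>
    intro t
    rw [pvM_cons]
    split
    · rename_i h
      have h2 : t < PySem.Str.len q.1 := of_decide_eq_true (Bool.and_elim_right h)
      exact le_trans (le_of_lt h2) (ih _)
    · exact ih t

theorem pvM_bound (e : String) : ∀ (pairs : List (String × String)) (t : Int) (pr : String × String),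
    pr ∈ pairs → PySem.Str.startswith e pr.1 = true → PySem.Str.len pr.1 ≤ pvM e pairs t := by
  intro pairs
  induction pairs with
  | nil => intro t pr h; simp at h
  | cons q rest ih =>
    intro t pr hmem hsw
    rw [pvM_cons]
    rcases List.mem_cons.mp hmem with h | h
    · subst h
      split
      · exact pvM_ge e rest _
      · rename_i hcond
        rw [hsw, Bool.true_and] at hcond
        have : ¬ (t < PySem.Str.len pr.1) := of_decide_eq_false (Bool.of_not_eq_true hcond)
        exact le_trans (le_of_not_gt this) (pvM_ge e rest t)
    · exact ih _ pr h hsw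

theorem pvM_mem (e : String) : ∀ (pairs : List (String × String)) (t : Int),
    pvM e pairs t = t ∨ ∃ pr ∈ pairs, PySem.Str.startswith e pr.1 = true ∧ PySem.Str.len pr.1 = pvM e pairs t := by
  intro pairs
  induction pairs with
  | nil => intro t; exact Or.inl rfl
  | cons q rest ih =>
    intro t
    rw [pvM_cons]
    split
    · rename_i hcond
      rcases ih (PySem.Str.len q.1) with h | ⟨pr, hm, hs, hl⟩
      · exact Or.inr ⟨q, List.mem_cons_self, Bool.and_elim_left hcond, h.symm⟩
      · exact Or.inr ⟨pr, List.mem_cons_of_mem _ hm, hs, hl⟩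
    · rcases ih t with h | ⟨pr, hm, hs, hl⟩
      · exact Or.inl h
      · exact Or.inr ⟨pr, List.mem_cons_of_mem _ hm, hs, hl⟩

-- A's inner fold, characterized: its length component is pvM, its name component the first pair attaining it
theorem pv_foldP_spec (e : String) : ∀ (pairs : List (String × String)) (bb : String) (bl : Int),
    pairs.foldl (pvStepP e) (bb, bl) =
      ((((pairs.find? (fun q => PySem.Str.startswith e q.1 && (PySem.Str.len q.1 == pvM e pairs bl) && decide (bl < pvM e pairs bl))).map (fun q => q.2)).getD bb), pvM e pairs bl) := by
  intro pairs
  induction pairs with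
  | nil => intro bb bl; simp [pvM]
  | cons q rest ih =>
    intro bb bl
    rw [List.foldl_cons, pvM_cons]
    by_cases hcond : (PySem.Str.startswith e q.1 && decide (bl < PySem.Str.len q.1)) = true
    · have hstep : pvStepP e (bb, bl) q = (q.2, PySem.Str.len q.1) := by
        unfold pvStepP; rw [if_pos hcond]
      have harg : (if (PySem.Str.startswith e q.1 && decide (bl < PySem.Str.len q.1)) = true then PySem.Str.len q.1 else bl) = PySem.Str.len q.1 := if_pos hcond
      rw [harg, hstep, ih q.2 (PySem.Str.len q.1)]
      have hsw : PySem.Str.startswith e q.1 = true := Bool.and_elim_left hcond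
      have hlt : bl < PySem.Str.len q.1 := of_decide_eq_true (Bool.and_elim_right hcond)
      have hge : PySem.Str.len q.1 ≤ pvM e rest (PySem.Str.len q.1) := pvM_ge e rest _
      by_cases heq : PySem.Str.len q.1 = pvM e rest (PySem.Str.len q.1)
      · -- the head attains the maximum: the outer find? fires at the head
        have hc : (PySem.Str.startswith e q.1 && (PySem.Str.len q.1 == pvM e rest (PySem.Str.len q.1)) && decide (bl < pvM e rest (PySem.Str.len q.1))) = true := by
          rw [hsw, ← heq]
          simp
          simpa using hlt
        simp only [List.find?_cons, hc]
        simp only [Option.map_some, Option.getD_some]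
        -- the inner find? cannot fire: matches in rest need length > the maximum
        have hnone : rest.find? (fun q' => PySem.Str.startswith e q'.1 && (PySem.Str.len q'.1 == pvM e rest (PySem.Str.len q.1)) && decide (PySem.Str.len q.1 < pvM e rest (PySem.Str.len q.1))) = none := by
          rw [List.find?_eq_none]
          intro x hx
          rw [← heq]
          simp
        rw [hnone]
        rfl
      · -- the maximum is attained strictly inside rest
        have hMgt : PySem.Str.len q.1 < pvM e rest (PySem.Str.len q.1) := lt_of_le_of_ne hge heq
        have hmid : (PySem.Str.len q.1 == pvM e rest (PySem.Str.len q.1)) = false := by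
          simpa using ne_of_lt hMgt
        have hc : (PySem.Str.startswith e q.1 && (PySem.Str.len q.1 == pvM e rest (PySem.Str.len q.1)) && decide (bl < pvM e rest (PySem.Str.len q.1))) = false := by
          rw [hmid]
          simp
        simp only [List.find?_cons, hc]
        -- the two find? predicates agree: both constant trailing conjuncts are true
        have hpred : (fun q' : String × String => PySem.Str.startswith e q'.1 && (PySem.Str.len q'.1 == pvM e rest (PySem.Str.len q.1)) && decide (PySem.Str.len q.1 < pvM e rest (PySem.Str.len q.1)))
            = (fun q' : String × String => PySem.Str.startswith e q'.1 && (PySem.Str.len q'.1 == pvM e rest (PySem.Str.len q.1)) && decide (bl < pvM e rest (PySem.Str.len q.1))) := by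
          funext q'
          rw [decide_eq_true hMgt, decide_eq_true (lt_trans hlt hMgt)]
        rw [← hpred]
        -- the find? succeeds, so the differing getD defaults do not matter
        obtain ⟨pr, hm, hs, hl⟩ := (pvM_mem e rest (PySem.Str.len q.1)).resolve_left (fun h => heq h.symm)
        have hsome : (rest.find? (fun q' : String × String => PySem.Str.startswith e q'.1 && (PySem.Str.len q'.1 == pvM e rest (PySem.Str.len q.1)) && decide (PySem.Str.len q.1 < pvM e rest (PySem.Str.len q.1)))).isSome = true := by
          rw [List.find?_isSome]
          exact ⟨pr, hm, by rw [hs, hl]; simp; simpa using hMgt⟩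
        cases hfind : rest.find? (fun q' : String × String => PySem.Str.startswith e q'.1 && (PySem.Str.len q'.1 == pvM e rest (PySem.Str.len q.1)) && decide (PySem.Str.len q.1 < pvM e rest (PySem.Str.len q.1))) with
        | none => rw [hfind] at hsome; simp at hsome
        | some pr' => simp
    · have hcf : (PySem.Str.startswith e q.1 && decide (bl < PySem.Str.len q.1)) = false := Bool.of_not_eq_true hcond
      have hstep : pvStepP e (bb, bl) q = (bb, bl) := by
        unfold pvStepP; rw [if_neg hcond]
      have harg : (if (PySem.Str.startswith e q.1 && decide (bl < PySem.Str.len q.1)) = true then PySem.Str.len q.1 else bl) = bl := if_neg hcond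
      rw [harg, hstep, ih bb bl]
      have hc : (PySem.Str.startswith e q.1 && (PySem.Str.len q.1 == pvM e rest bl) && decide (bl < pvM e rest bl)) = false := by
        by_cases hsw : PySem.Str.startswith e q.1 = true
        · rw [hsw] at hcf
          rw [Bool.true_and] at hcf
          have hle : PySem.Str.len q.1 ≤ bl := le_of_not_gt (of_decide_eq_false hcf)
          by_cases hb : (PySem.Str.len q.1 == pvM e rest bl) = true
          · have hps : pvM e rest bl ≤ bl := by rw [← eq_of_beq hb]; exact hle
            have h2 : decide (bl < pvM e rest bl) = false := decide_eq_false (not_lt.mpr hps)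
            rw [h2]
            simp
          · rw [Bool.of_not_eq_true hb]
            simp
        · rw [Bool.of_not_eq_true hsw]
          simp
      simp only [List.find?_cons, hc]

-- ---------- the prefix dictionary ----------

theorem pv_pd_get? (bs : List String) : ∀ (acc : PySem.Dict String String) (q : String),
    ((bs.foldl (fun d b => d.setdefault (pvPfx b) b) acc).get? q)
      = (acc.get? q).or (((bs.map (fun b => (pvPfx b, b))).find? (fun pr => pr.1 == q)).map (fun pr => pr.2)) := by
  induction bs with
  | nil => intro acc q; simp
  | cons b rest ih =>
    intro acc q
    rw [List.foldl_cons, List.map_cons, List.find?_cons, ih]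
    by_cases hq : q = pvPfx b
    · subst hq
      rw [PySem.Dict.get?_setdefault_self]
      simp only [beq_self_eq_true]
      cases hacc : acc.get? (pvPfx b) with
      | none => simp
      | some v => simp
    · rw [PySem.Dict.get?_setdefault_of_ne _ _ hq]
      have : ((pvPfx b) == q) = false := by
        simp
        exact fun h => hq h.symm
      rw [this]

theorem pv_pd_get?_empty (bs : List String) (q : String) :
    ((bs.foldl (fun d b => d.setdefault (pvPfx b) b) PySem.Dict.empty).get? q)
      = ((bs.map (fun b => (pvPfx b, b))).find? (fun pr => pr.1 == q)).map (fun pr => pr.2) := by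
  rw [pv_pd_get?]
  rfl

-- every key of pd is the prefix of one of the bases it was built from, with that base as value
theorem pv_pd_mem (bs : List String) (q : String) (b : String)
    (h : (bs.foldl (fun d b => d.setdefault (pvPfx b) b) PySem.Dict.empty).get? q = some b) :
    b ∈ bs ∧ q = pvPfx b := by
  rw [pv_pd_get?_empty] at h
  cases hf : (bs.map (fun b => (pvPfx b, b))).find? (fun pr => pr.1 == q) with
  | none => rw [hf] at h; simp at h
  | some pr =>
    rw [hf] at h
    simp at h
    have hmem := List.mem_of_find?_eq_some hf
    have hpred := List.find?_some hf
    simp at hpred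
    obtain ⟨b', hb', hpr⟩ := List.mem_map.mp hmem
    obtain rfl := hpr.symm
    simp at h hpred
    subst h
    exact ⟨hb', hpred.symm⟩

-- ---------- the scan, characterized through Nat.findGreatest ----------

theorem pv_slice_take (e : String) (k : Nat) :
    PySem.Str.slice e none (some ((k : Int) + 1)) = String.ofList (e.toList.take (k + 1)) := by
  unfold PySem.Str.slice
  congr 1
  rw [PySem.Chars.slice_eq_listSlice]
  have : ((k : Int) + 1) = ((k + 1 : Nat) : Int) := by push_cast; ring
  rw [this, PySem.List.slice_to _ (by positivity)]
  simp

theorem pv_scan_spec (pd : PySem.Dict String String) (e : String) :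
    ∀ (k : Nat), pvScan pd e k =
      (if 0 < Nat.findGreatest (pvPhit pd e) k then
        ((pd.get? (String.ofList (e.toList.take (Nat.findGreatest (pvPhit pd e) k)))).getD "normal")
      else "normal") := by
  intro k
  induction k with
  | zero => simp [pvScan, Nat.findGreatest]
  | succ k ih =>
    show (match pd.get? (PySem.Str.slice e none (some ((k : Int) + 1))) with
          | some b => b | none => pvScan pd e k) = _
    cases hg : pd.get? (String.ofList (e.toList.take (k + 1))) with
    | some b =>
      have hp : pvPhit pd e (k + 1) := ⟨Nat.succ_pos k, by rw [hg]; rfl⟩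
      rw [pv_slice_take, Nat.findGreatest_succ, if_pos hp, if_pos (Nat.succ_pos k), hg]
      rfl
    | none =>
      have hp : ¬ pvPhit pd e (k + 1) := by
        intro hx
        obtain ⟨-, hx2⟩ := hx
        rw [hg] at hx2
        simp at hx2
      rw [pv_slice_take, Nat.findGreatest_succ, if_neg hp, hg]
      simpa using ih

theorem pv_scan_val (pd : PySem.Dict String String) (e : String) :
    ∀ (k : Nat), pvScan pd e k = "normal" ∨ ∃ q, pd.get? q = some (pvScan pd e k) := by
  intro k
  induction k with
  | zero => exact Or.inl rfl
  | succ k ih =>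
    have hstep : pvScan pd e (k + 1) = (match pd.get? (PySem.Str.slice e none (some ((k : Int) + 1))) with
          | some b => b | none => pvScan pd e k) := rfl
    cases hg : pd.get? (PySem.Str.slice e none (some ((k : Int) + 1))) with
    | some b =>
      right
      exact ⟨_, by rw [hstep, hg]⟩
    | none =>
      rcases ih with h | ⟨q, hq⟩
      · left; rw [hstep, hg]; exact h
      · right; exact ⟨q, by rw [hstep, hg]; exact hq⟩

-- ---------- A's inner loop against B's scan ----------

-- A's inner loop body, named
def pvStepA (e : String) (best : String × Int) (base_name : String) : String × Int :=
  if base_name == "normal" then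
    (if PySem.Str.isIn "_" e then best else ("normal", best.2))
  else
    let prefix_ := PySem.Str.replace base_name "_normal" "_"
    if PySem.Str.startswith e prefix_ && decide (best.2 < PySem.Str.len prefix_) then
      (base_name, PySem.Str.len prefix_)
    else best

theorem pv_no_underscore_startswith (e b : String) (hu : PySem.Str.isIn "_" e = false)
    (hb : PySem.Str.endswith b "_normal" = true) :
    PySem.Str.startswith e (pvPfx b) = false := by
  by_contra h
  have hsw : PySem.Str.startswith e (pvPfx b) = true := Bool.of_not_eq_false h
  rw [PySem.Str.startswith_eq, PySem.Chars.startswith_iff] at hsw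
  have hin : '_' ∈ e.toList := hsw.subset (pv_underscore_pfx b hb)
  rw [← pv_isIn_underscore] at hin
  rw [hin] at hu
  simp at hu

theorem pv_fold_no_underscore (e : String) (hu : PySem.Str.isIn "_" e = false) :
    ∀ (K : List String), (∀ b ∈ K, b = "normal" ∨ PySem.Str.endswith b "_normal" = true) →
      K.foldl (pvStepA e) ("normal", 0) = ("normal", 0) := by
  intro K
  induction K with
  | nil => intro _; rfl
  | cons b K' ih =>
    intro hall
    rw [List.foldl_cons]
    have hstep : pvStepA e ("normal", 0) b = ("normal", 0) := by
      unfold pvStepA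
      by_cases hb : (b == "normal") = true
      · rw [if_pos hb, hu]
        rfl
      · rw [if_neg hb]
        have hbe : PySem.Str.endswith b "_normal" = true := by
          rcases hall b List.mem_cons_self with h | h
          · exact absurd (by rw [h]; rfl) hb
          · exact h
        have hsw := pv_no_underscore_startswith e b hu hbe
        show (if PySem.Str.startswith e (pvPfx b) && decide ((0:Int) < PySem.Str.len (pvPfx b)) then _ else _) = _
        rw [hsw]
        rfl
    rw [hstep]
    exact ih (fun x hx => hall x (List.mem_cons_of_mem _ hx))

theorem pv_scan_no_underscore (e : String) (hu : PySem.Str.isIn "_" e = false)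
    (nb : List String) (hnb : ∀ b ∈ nb, PySem.Str.endswith b "_normal" = true) (k : Nat) :
    pvScan (nb.foldl (fun d b => d.setdefault (pvPfx b) b) PySem.Dict.empty) e k = "normal" := by
  rw [pv_scan_spec]
  have h0 : Nat.findGreatest (pvPhit (nb.foldl (fun d b => d.setdefault (pvPfx b) b) PySem.Dict.empty) e) k = 0 := by
    rw [Nat.findGreatest_eq_zero_iff]
    intro n hn _ hP
    obtain ⟨-, hs⟩ := hP
    obtain ⟨b, hb⟩ := Option.isSome_iff_exists.mp hs
    obtain ⟨hbnb, hq⟩ := pv_pd_mem nb _ b hb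
    have h1 : '_' ∈ (pvPfx b).toList := pv_underscore_pfx b (hnb b hbnb)
    rw [← hq, String.toList_ofList] at h1
    have h2 : '_' ∈ e.toList := List.take_subset n e.toList h1
    rw [← pv_isIn_underscore] at h2
    rw [h2] at hu
    simp at hu
  rw [h0]
  rfl

theorem pv_main_inner (e : String) (K nb : List String)
    (hnb : K.filter (fun b => !(b == "normal")) = nb)
    (hKall : ∀ b ∈ K, b = "normal" ∨ PySem.Str.endswith b "_normal" = true) :
    (K.foldl (pvStepA e) ("normal", 0)).1
      = pvScan (nb.foldl (fun d b => d.setdefault (pvPfx b) b) PySem.Dict.empty) e (PySem.Str.len e).toNat := by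
  have hlen : (PySem.Str.len e).toNat = e.toList.length := by
    rw [PySem.Str.len_eq]
    exact Int.toNat_natCast _
  have hnb_end : ∀ b ∈ nb, PySem.Str.endswith b "_normal" = true := by
    intro b hb
    rw [← hnb] at hb
    have hm := List.mem_of_mem_filter hb
    have hp := List.of_mem_filter hb
    rcases hKall b hm with h | h
    · rw [h] at hp
      simp at hp
    · exact h
  by_cases hu : PySem.Str.isIn "_" e = true
  case neg =>
    have hu' : PySem.Str.isIn "_" e = false := Bool.of_not_eq_true hu
    rw [pv_fold_no_underscore e hu' K hKall, pv_scan_no_underscore e hu' nb hnb_end]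
  · -- e contains an underscore: the "normal" entries of K are no-ops
    have hfun : pvStepA e = (fun (st : String × Int) b => if (!(b == "normal")) = true then pvStepP e st (pvPfx b, b) else st) := by
      funext st b
      by_cases hb : (b == "normal") = true
      · have hbs : b = "normal" := eq_of_beq hb
        subst hbs
        have hu' : PySem.Chars.isIn ['_'] e.toList = true := by simpa [PySem.Str.isIn_eq] using hu
        simp [pvStepA, hu']
      · have hbs : (b == "normal") = false := Bool.of_not_eq_true hb
        simp [pvStepA, pvStepP, pvPfx, hbs]
    rw [hfun, ← List.foldl_filter, hnb, ← List.foldl_map (f := fun b => (pvPfx b, b)) (g := pvStepP e)]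
    rw [pv_foldP_spec, pv_scan_spec, hlen]
    set pairs := nb.map (fun b => (pvPfx b, b)) with hpairs
    set pd := nb.foldl (fun d b => d.setdefault (pvPfx b) b) PySem.Dict.empty with hpd
    set M := pvM e pairs 0 with hM
    have hM0 : (0:Int) ≤ M := pvM_ge e pairs 0
    set m' := Nat.findGreatest (pvPhit pd e) e.toList.length with hm'
    have hm'le : m' ≤ e.toList.length := Nat.findGreatest_le _
    -- the two maxima agree
    have hMm : M = (m' : Int) := by
      by_cases h0 : M = 0
      · rw [h0]
        have : m' = 0 := by
          rw [hm', Nat.findGreatest_eq_zero_iff]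
          intro n hn hnl hP
          obtain ⟨-, hs⟩ := hP
          obtain ⟨b, hb⟩ := Option.isSome_iff_exists.mp hs
          obtain ⟨hbnb, hq⟩ := pv_pd_mem nb _ b hb
          have hsw : PySem.Str.startswith e (pvPfx b) = true ∧ (pvPfx b).toList.length = n := by
            rw [← pv_take_iff _ _ _ hnl]
            exact hq.symm
          have hbd := pvM_bound e pairs 0 (pvPfx b, b) (List.mem_map_of_mem hbnb) hsw.1
          rw [← hM, h0, PySem.Str.len_eq, hsw.2] at hbd
          omega
        rw [this]
        rfl
      · obtain ⟨pr, hm, hs, hl⟩ := (pvM_mem e pairs 0).resolve_left h0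
        have hMpos : 0 < M := lt_of_le_of_ne hM0 (fun h => h0 h.symm)
        have hjM : (pr.1.toList.length : Int) = M := by
          rw [hM, ← hl, PySem.Str.len_eq]
        have hjlen : pr.1.toList.length ≤ e.toList.length := by
          have := (PySem.Chars.startswith_iff e.toList pr.1.toList).mp (by rw [← PySem.Str.startswith_eq]; exact hs)
          exact this.length_le
        have : m' = pr.1.toList.length := by
          rw [hm', Nat.findGreatest_eq_iff]
          refine ⟨hjlen, ?_, ?_⟩
          · intro hne
            refine ⟨Nat.pos_of_ne_zero hne, ?_⟩
            have hpr1 : pr.1 = String.ofList (e.toList.take pr.1.toList.length) :=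
              (pv_take_iff _ _ _ hjlen).mpr ⟨hs, rfl⟩
            rw [hpd, pv_pd_get?_empty, ← hpairs, ← hpr1]
            rw [Option.isSome_map]
            rw [List.find?_isSome]
            exact ⟨pr, hm, by simp⟩
          · intro n hgt hle hP
            obtain ⟨-, hsome⟩ := hP
            obtain ⟨b, hb⟩ := Option.isSome_iff_exists.mp hsome
            rw [hpd] at hb
            obtain ⟨hbnb, hq⟩ := pv_pd_mem nb _ b hb
            have hsw : PySem.Str.startswith e (pvPfx b) = true ∧ (pvPfx b).toList.length = n := by
              rw [← pv_take_iff _ _ _ hle]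
              exact hq.symm
            have hbd := pvM_bound e pairs 0 (pvPfx b, b) (List.mem_map_of_mem hbnb) hsw.1
            rw [← hM, PySem.Str.len_eq, hsw.2] at hbd
            omega
        rw [this, hjM]
    -- conclude, splitting on whether anything matched
    by_cases h0 : M = 0
    · have hm'0 : m' = 0 := by
        have := hMm
        rw [h0] at this
        exact_mod_cast this.symm
      rw [hm'0]
      simp only [Nat.lt_irrefl, if_false]
      have hnone : pairs.find? (fun q => PySem.Str.startswith e q.1 && (PySem.Str.len q.1 == pvM e pairs 0) && decide ((0:Int) < pvM e pairs 0)) = none := by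
        rw [List.find?_eq_none]
        intro x hx
        rw [← hM, h0]
        simp
      rw [hnone]
      rfl
    · have hMpos : 0 < M := lt_of_le_of_ne hM0 (fun h => h0 h.symm)
      have hm'pos : 0 < m' := by
        rw [hMm] at hMpos
        exact_mod_cast hMpos
      rw [if_pos hm'pos]
      rw [hpd, pv_pd_get?_empty, ← hpairs]
      have hpred : (fun q : String × String => PySem.Str.startswith e q.1 && (PySem.Str.len q.1 == pvM e pairs 0) && decide ((0:Int) < pvM e pairs 0))
          = (fun pr : String × String => pr.1 == String.ofList (e.toList.take m')) := by
        funext q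
        rw [decide_eq_true hMpos]
        rw [Bool.and_true]
        apply Bool.eq_iff_iff.mpr
        rw [Bool.and_eq_true]
        rw [beq_iff_eq, beq_iff_eq]
        constructor
        · rintro ⟨h1, h2⟩
          apply (pv_take_iff _ _ _ hm'le).mpr
          refine ⟨h1, ?_⟩
          rw [← hM] at h2
          rw [hMm] at h2
          rw [PySem.Str.len_eq] at h2
          exact_mod_cast h2
        · intro h
          have := (pv_take_iff _ _ _ hm'le).mp h
          refine ⟨this.1, ?_⟩
          rw [PySem.Str.len_eq, this.2, ← hM, hMm]
        
      rw [hpred]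

-- ---------- pass 1: collecting the base expressions ----------

def pvStepA1 (groups : PySem.Dict String (List String)) (expr : String) : PySem.Dict String (List String) :=
  if expr == "normal" then groups.setdefault "normal" []
  else if PySem.Str.endswith expr "_normal" then groups.setdefault expr []
  else groups

def pvStepB1 (st : List String × PySem.Set String) (e : String) : List String × PySem.Set String :=
  if pvIsBase e && !(PySem.Set.contains st.2 e) then (st.1 ++ [e], PySem.Set.add st.2 e) else st

-- B's seen-set loop as a pure function of the bases list
def pvBasesAux : List String → List String → List String
  | [], bs => bs
  | e :: L', bs => if pvIsBase e && !(bs.contains e) then pvBasesAux L' (bs ++ [e]) else pvBasesAux L' bs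

theorem pv_basesB_diag : ∀ (L : List String) (bs : List String),
    L.foldl pvStepB1 (bs, bs) = (pvBasesAux L bs, pvBasesAux L bs) := by
  intro L
  induction L with
  | nil => intro bs; rfl
  | cons e L' ih =>
    intro bs
    rw [List.foldl_cons]
    unfold pvBasesAux
    by_cases h : (pvIsBase e && !(bs.contains e)) = true
    · have hadd : PySem.Set.add bs e = bs ++ [e] := by
        unfold PySem.Set.add
        rw [if_neg]
        intro hc
        have hc' : bs.contains e = true := hc
        rw [hc'] at h
        simp at h
      have hstep : pvStepB1 (bs, bs) e = (bs ++ [e], bs ++ [e]) := by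
        show (if (pvIsBase e && !(bs.contains e)) = true then (bs ++ [e], PySem.Set.add bs e) else (bs, bs)) = _
        rw [if_pos h, hadd]
      rw [hstep, if_pos h]
      exact ih (bs ++ [e])
    · have hstep : pvStepB1 (bs, bs) e = (bs, bs) := by
        show (if (pvIsBase e && !(bs.contains e)) = true then (bs ++ [e], PySem.Set.add bs e) else (bs, bs)) = _
        rw [if_neg h]
      rw [hstep, if_neg h]
      exact ih bs

theorem pv_list_contains_iff (l : List String) (x : String) : l.contains x = true ↔ x ∈ l := by
  simp

theorem pv_basesAux_nodup : ∀ (L : List String) (bs : List String), bs.Nodup → (pvBasesAux L bs).Nodup := by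
  intro L
  induction L with
  | nil => intro bs h; exact h
  | cons e L' ih =>
    intro bs h
    unfold pvBasesAux
    split
    · rename_i hc
      refine ih _ ?_
      rw [List.nodup_append]
      refine ⟨h, List.nodup_singleton e, ?_⟩
      intro x hx
      simp
      intro hxe
      subst hxe
      have := Bool.and_elim_right hc
      simp at this
      exact absurd hx this
    · exact ih _ h

theorem pv_basesAux_mem : ∀ (L : List String) (bs : List String) (x : String),
    x ∈ pvBasesAux L bs ↔ x ∈ bs ∨ (x ∈ L ∧ pvIsBase x = true) := by
  intro L
  induction L with
  | nil => intro bs x; simp [pvBasesAux]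
  | cons e L' ih =>
    intro bs x
    unfold pvBasesAux
    split
    · rename_i hc
      rw [ih, List.mem_append, List.mem_singleton, List.mem_cons]
      constructor
      · rintro ((h | h) | ⟨h1, h2⟩)
        · exact Or.inl h
        · subst h
          exact Or.inr ⟨Or.inl rfl, Bool.and_elim_left hc⟩
        · exact Or.inr ⟨Or.inr h1, h2⟩
      · rintro (h | ⟨h1 | h1, h2⟩)
        · exact Or.inl (Or.inl h)
        · exact Or.inl (Or.inr h1)
        · exact Or.inr ⟨h1, h2⟩
    · rename_i hc
      rw [ih, List.mem_cons]
      constructor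
      · rintro (h | ⟨h1, h2⟩)
        · exact Or.inl h
        · exact Or.inr ⟨Or.inr h1, h2⟩
      · rintro (h | ⟨h1 | h1, h2⟩)
        · exact Or.inl h
        · subst h1
          by_cases hm : x ∈ bs
          · exact Or.inl hm
          · exfalso
            apply hc
            rw [h2, Bool.true_and, Bool.not_eq_true']
            rw [← Bool.not_eq_true, pv_list_contains_iff]
            exact hm
        · exact Or.inr ⟨h1, h2⟩

theorem pv_contains_of_items (d : PySem.Dict String (List String)) (bs : List String)
    (h : d.items = bs.map (fun b => (b, ([] : List String)))) (x : String) :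
    d.contains x = bs.contains x := by
  show d.items.any (fun p => p.1 == x) = _
  rw [h, List.any_map]
  show bs.any (fun b => b == x) = bs.contains x
  by_cases hm : x ∈ bs
  · rw [(pv_list_contains_iff bs x).mpr hm, List.any_eq_true]
    exact ⟨x, hm, by simp⟩
  · have h1 : bs.contains x = false := by
      rw [← Bool.not_eq_true, pv_list_contains_iff]
      exact hm
    rw [h1, ← Bool.not_eq_true, List.any_eq_true]
    rintro ⟨y, hy, hxy⟩
    exact hm (by rw [← eq_of_beq hxy]; exact hy)

theorem pv_pass1A : ∀ (L : List String) (d : PySem.Dict String (List String)) (bs : List String),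
    d.items = bs.map (fun b => (b, ([] : List String))) →
    (L.foldl pvStepA1 d).items = (pvBasesAux L bs).map (fun b => (b, ([] : List String))) := by
  intro L
  induction L with
  | nil => intro d bs h; exact h
  | cons e L' ih =>
    intro d bs h
    rw [List.foldl_cons]
    unfold pvBasesAux
    have hcont : d.contains e = bs.contains e := pv_contains_of_items d bs h e
    by_cases hB : pvIsBase e = true
    · have hstep : pvStepA1 d e = d.setdefault e [] := by
        unfold pvStepA1
        by_cases he : (e == "normal") = true
        · rw [if_pos he, eq_of_beq he]
        · rw [if_neg he]
          have hend : PySem.Str.endswith e "_normal" = true := by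
            unfold pvIsBase at hB
            rcases Bool.or_eq_true_iff.mp hB with h' | h'
            · exact absurd h' he
            · exact h'
          rw [if_pos hend]
      rw [hstep]
      by_cases hc : bs.contains e = true
      · have : d.setdefault e [] = d := by
          unfold PySem.Dict.setdefault
          rw [if_pos (by rw [hcont]; exact hc)]
        rw [this, hB, hc]
        simp only [Bool.not_true, Bool.and_false, Bool.false_eq_true, if_false]
        exact ih d bs h
      · have hcf : bs.contains e = false := Bool.of_not_eq_true hc
        have hset : (d.setdefault e []).items = d.items ++ [(e, [])] := by
          unfold PySem.Dict.setdefault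
          rw [if_neg (by rw [hcont, hcf]; simp)]
        rw [hB, hcf]
        simp only [Bool.not_false, Bool.and_true, if_pos]
        refine ih _ (bs ++ [e]) ?_
        rw [hset, h, List.map_append]
        rfl
    · have hBf : pvIsBase e = false := Bool.of_not_eq_true hB
      have hstep : pvStepA1 d e = d := by
        unfold pvStepA1
        unfold pvIsBase at hBf
        rw [if_neg (by rw [Bool.or_eq_false_iff.mp hBf |>.1]; simp),
            if_neg (by rw [Bool.or_eq_false_iff.mp hBf |>.2]; simp)]
      rw [hstep, hBf]
      simp only [Bool.false_and, Bool.false_eq_true, if_false]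
      exact ih d bs h

theorem pv_members0 (bases : List String) (hnd : bases.Nodup) :
    (bases.foldl (fun d b => d.insert b ([] : List String)) PySem.Dict.empty).items
      = bases.map (fun b => (b, ([] : List String))) := by
  have := PySem.Dict.items_foldl_insert_fresh bases (fun b => b) (fun _ => ([] : List String))
    PySem.Dict.empty (fun a _ => rfl) (by simpa using hnd)
  simpa using this

-- ---------- pass 2 ----------

def pvStepA2 (groups : PySem.Dict String (List String)) (expr : String) : PySem.Dict String (List String) :=
  if groups.contains expr then groups
  else
    let best := groups.keys.foldl (pvStepA expr) ("normal", 0)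
    (groups.setdefault best.1 []).modify best.1 [] (fun ms => ms ++ [expr])

def pvStepB2 (pd : PySem.Dict String String) (d : PySem.Dict String (List String)) (e : String) :
    PySem.Dict String (List String) :=
  if pvIsBase e then d
  else
    let base := pvScan pd e (PySem.Str.len e).toNat
    (d.setdefault base []).modify base [] (fun ms => ms ++ [e])

def pvInv (bases : List String) (g : PySem.Dict String (List String)) : Prop :=
  ∃ ex, g.keys = bases ++ ex ∧ (ex = [] ∨ (ex = ["normal"] ∧ "normal" ∉ bases))

theorem pv_keys_insert_contains (d : PySem.Dict String (List String)) (k : String) (v : List String)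
    (h : d.contains k = true) : (d.insert k v).keys = d.keys := by
  unfold PySem.Dict.insert
  rw [if_pos h]
  show (d.items.map _).map _ = _
  rw [List.map_map]
  apply List.map_congr_left
  intro p _
  show (if (p.1 == k) = true then (k, v) else p).1 = p.1
  by_cases hpk : (p.1 == k) = true
  · rw [if_pos hpk]
    exact (eq_of_beq hpk).symm
  · rw [if_neg hpk]

theorem pv_contains_iff_mem_keys (d : PySem.Dict String (List String)) (x : String) :
    d.contains x = true ↔ x ∈ d.keys := by
  show d.items.any (fun p => p.1 == x) = true ↔ _
  rw [List.any_eq_true]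
  unfold PySem.Dict.keys
  constructor
  · rintro ⟨p, hp, hpx⟩
    rw [← eq_of_beq hpx]
    exact List.mem_map_of_mem hp
  · intro h
    obtain ⟨p, hp, hpx⟩ := List.mem_map.mp h
    exact ⟨p, hp, by rw [hpx]; simp⟩

theorem pv_pass2 (bases : List String) (hb_isB : ∀ b ∈ bases, pvIsBase b = true)
    (pd : PySem.Dict String String)
    (hpd : pd = (bases.filter (fun b => !(b == "normal"))).foldl
      (fun d b => d.setdefault (pvPfx b) b) PySem.Dict.empty) :
    ∀ (L' : List String), (∀ e ∈ L', pvIsBase e = true → e ∈ bases) →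
    ∀ g, pvInv bases g →
      L'.foldl pvStepA2 g = L'.foldl (pvStepB2 pd) g ∧ pvInv bases (L'.foldl pvStepA2 g) := by
  intro L'
  induction L' with
  | nil => intro _ g hInv; exact ⟨rfl, hInv⟩
  | cons e L' ih =>
    intro hL g hInv
    obtain ⟨ex, hkeys, hex⟩ := hInv
    have hL' : ∀ x ∈ L', pvIsBase x = true → x ∈ bases := fun x hx => hL x (List.mem_cons_of_mem _ hx)
    rw [List.foldl_cons, List.foldl_cons]
    by_cases hB : pvIsBase e = true
    · -- base expression: both sides skip
      have hmem : e ∈ bases := hL e List.mem_cons_self hB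
      have hcont : g.contains e = true := by
        rw [pv_contains_iff_mem_keys, hkeys]
        exact List.mem_append_left _ hmem
      have hA : pvStepA2 g e = g := by
        unfold pvStepA2
        rw [if_pos hcont]
      have hBstep : pvStepB2 pd g e = g := by
        unfold pvStepB2
        rw [if_pos hB]
      rw [hA, hBstep]
      exact ih hL' g ⟨ex, hkeys, hex⟩
    · -- non-base expression: both sides append it to the same group
      have hBf : pvIsBase e = false := Bool.of_not_eq_true hB
      have hnotmem : e ∉ bases := fun h => hB (hb_isB e h)
      have hnenormal : e ≠ "normal" := by
        intro h
        subst h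
        exact hB (by decide)
      have hcont : g.contains e = false := by
        rw [← Bool.not_eq_true, pv_contains_iff_mem_keys, hkeys]
        intro hmm
        rcases List.mem_append.mp hmm with h | h
        · exact hnotmem h
        · rcases hex with h' | ⟨h', -⟩
          · rw [h'] at h; simp at h
          · rw [h'] at h; simp at h; exact hnenormal h
      -- the chosen group name agrees
      have hKfilter : g.keys.filter (fun b => !(b == "normal")) = bases.filter (fun b => !(b == "normal")) := by
        rw [hkeys, List.filter_append]
        rcases hex with h' | ⟨h', -⟩
        · rw [h']; simp
        · rw [h']; simp
      have hKall : ∀ b ∈ g.keys, b = "normal" ∨ PySem.Str.endswith b "_normal" = true := by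
        intro b hb
        rw [hkeys] at hb
        have hbB : pvIsBase b = true := by
          rcases List.mem_append.mp hb with h | h
          · exact hb_isB b h
          · rcases hex with h' | ⟨h', -⟩
            · rw [h'] at h; simp at h
            · rw [h'] at h
              simp at h
              rw [h]
              decide
        unfold pvIsBase at hbB
        rcases Bool.or_eq_true_iff.mp hbB with h | h
        · exact Or.inl (eq_of_beq h)
        · exact Or.inr h
      have hbest : (g.keys.foldl (pvStepA e) ("normal", 0)).1 = pvScan pd e (PySem.Str.len e).toNat := by
        rw [hpd, ← hKfilter]
        exact pv_main_inner e g.keys _ rfl hKall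
      have hA : pvStepA2 g e =
          (g.setdefault (pvScan pd e (PySem.Str.len e).toNat) []).modify
            (pvScan pd e (PySem.Str.len e).toNat) [] (fun ms => ms ++ [e]) := by
        unfold pvStepA2
        rw [if_neg (by rw [hcont]; simp)]
        show ((g.setdefault (g.keys.foldl (pvStepA e) ("normal", 0)).1 []).modify
          (g.keys.foldl (pvStepA e) ("normal", 0)).1 [] (fun ms => ms ++ [e])) = _
        rw [hbest]
      have hBstep : pvStepB2 pd g e =
          (g.setdefault (pvScan pd e (PySem.Str.len e).toNat) []).modify
            (pvScan pd e (PySem.Str.len e).toNat) [] (fun ms => ms ++ [e]) := by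
        unfold pvStepB2
        rw [if_neg (by rw [hBf]; simp)]
      rw [hA, hBstep]
      -- the new dict still satisfies the invariant
      set base := pvScan pd e (PySem.Str.len e).toNat with hbase
      have hbase_cases : base = "normal" ∨ base ∈ bases := by
        rcases pv_scan_val pd e (PySem.Str.len e).toNat with h | ⟨q, hq⟩
        · exact Or.inl h
        · rw [hpd] at hq
          obtain ⟨hmem', -⟩ := pv_pd_mem _ _ _ hq
          rw [← hpd] at hmem'
          exact Or.inr (List.mem_of_mem_filter hmem')
      have hkeys' : ∃ ex', ((g.setdefault base []).modify base [] (fun ms => ms ++ [e])).keys = bases ++ ex'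
          ∧ (ex' = [] ∨ (ex' = ["normal"] ∧ "normal" ∉ bases)) := by
        have hcont_sd : (g.setdefault base []).contains base = true := by
          rw [PySem.Dict.contains_setdefault]
          simp
        rw [PySem.Dict.keys_modify, pv_keys_insert_contains _ _ _ hcont_sd, PySem.Dict.keys_setdefault]
        by_cases hcb : g.contains base = true
        · rw [if_pos hcb, hkeys]
          exact ⟨ex, rfl, hex⟩
        · rw [if_neg hcb, hkeys]
          have hbn : base ∉ bases := by
            intro hmm
            exact hcb (by rw [pv_contains_iff_mem_keys, hkeys]; exact List.mem_append_left _ hmm)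
          have hbnormal : base = "normal" := by
            rcases hbase_cases with h | h
            · exact h
            · exact absurd h hbn
          have hexnil : ex = [] := by
            rcases hex with h | ⟨h, -⟩
            · exact h
            · exfalso
              apply hcb
              rw [pv_contains_iff_mem_keys, hkeys, h, hbnormal]
              simp
          rw [hexnil, hbnormal]
          exact ⟨["normal"], by simp, Or.inr ⟨rfl, hbnormal ▸ hbn⟩⟩
      obtain ⟨ex', hk', hex'⟩ := hkeys'
      exact ih hL' _ ⟨ex', hk', hex'⟩

-- ---------- assembling the two ports ----------

theorem pv_pdB_eq (bases : List String) :
    bases.foldl (fun d b => if b == "normal" then d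
        else d.setdefault (PySem.Str.replace b "_normal" "_") b) PySem.Dict.empty
      = (bases.filter (fun b => !(b == "normal"))).foldl
        (fun d b => d.setdefault (pvPfx b) b) PySem.Dict.empty := by
  rw [List.foldl_filter]
  have hfun : (fun (d : PySem.Dict String String) b => if b == "normal" then d
        else d.setdefault (PySem.Str.replace b "_normal" "_") b)
      = (fun (d : PySem.Dict String String) b =>
        if (!(b == "normal")) = true then d.setdefault (pvPfx b) b else d) := by
    funext d b
    cases h : (b == "normal")
    · simp [pvPfx]
    · simp
  rw [hfun]

-- ===== VERDICT (by name: the statement is the Claim_ definition above) =====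
theorem group_expressions_by_pose_spec : Claim_equal_group_expressions_by_pose := by
  intro L _
  unfold Spec_group_expressions_by_pose
  have hA : group_expressions_by_pose L
      = (L.foldl pvStepA2 (L.foldl pvStepA1 PySem.Dict.empty)).items.map (fun p => (p.1, p.2)) := rfl
  have hAlt : group_expressions_by_pose_alt L
      = (L.foldl (pvStepB2 (((L.foldl pvStepB1 ([], PySem.Set.empty)).1).foldl
            (fun d b => if b == "normal" then d
              else d.setdefault (PySem.Str.replace b "_normal" "_") b) PySem.Dict.empty))
          (((L.foldl pvStepB1 ([], PySem.Set.empty)).1).foldl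
            (fun d b => d.insert b ([] : List String)) PySem.Dict.empty)).items.map (fun p => (p.1, p.2)) := rfl
  rw [hA, hAlt]
  have hbp : (L.foldl pvStepB1 ([], PySem.Set.empty)).1 = pvBasesAux L [] :=
    congrArg Prod.fst (pv_basesB_diag L [])
  rw [hbp]
  have hnd : (pvBasesAux L []).Nodup := pv_basesAux_nodup L [] List.nodup_nil
  have hisB : ∀ b ∈ pvBasesAux L [], pvIsBase b = true := by
    intro b hb
    rcases (pv_basesAux_mem L [] b).mp hb with h | h
    · simp at h
    · exact h.2
  have hLmem : ∀ e ∈ L, pvIsBase e = true → e ∈ pvBasesAux L [] :=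
    fun e he hBe => (pv_basesAux_mem L [] e).mpr (Or.inr ⟨he, hBe⟩)
  have hA0 : (L.foldl pvStepA1 PySem.Dict.empty).items
      = (pvBasesAux L []).map (fun b => (b, ([] : List String))) :=
    pv_pass1A L PySem.Dict.empty [] rfl
  have hM0 : ((pvBasesAux L []).foldl (fun d b => d.insert b ([] : List String)) PySem.Dict.empty).items
      = (pvBasesAux L []).map (fun b => (b, ([] : List String))) := pv_members0 _ hnd
  have hginit : (pvBasesAux L []).foldl (fun d b => d.insert b ([] : List String)) PySem.Dict.empty
      = L.foldl pvStepA1 PySem.Dict.empty := by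
    apply PySem.Dict.ext
    rw [hA0, hM0]
  rw [hginit]
  have hInv : pvInv (pvBasesAux L []) (L.foldl pvStepA1 PySem.Dict.empty) := by
    refine ⟨[], ?_, Or.inl rfl⟩
    show (L.foldl pvStepA1 PySem.Dict.empty).items.map (fun x => x.1) = _
    rw [hA0, List.map_map]
    have hid : ∀ (l : List String), List.map ((fun x : String × List String => x.1) ∘ fun b => (b, ([] : List String))) l = l := by
      intro l
      induction l with
      | nil => rfl
      | cons a t ih => rw [List.map_cons, ih]; rfl
    rw [List.append_nil]
    exact hid _
  obtain ⟨heq, -⟩ := pv_pass2 (pvBasesAux L []) hisB _ (pv_pdB_eq (pvBasesAux L [])) L hLmem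
    (L.foldl pvStepA1 PySem.Dict.empty) hInv
  rw [heq]
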